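-- pv_equiv track=rewrite | github.com/coreyabshire/stacko | src/words.py | rejoin_special
-- ===== SOURCE A (Python) =====
-- special = set(['c', 'f'])
--
-- def rejoin_special(ws):
--     '''
--     This function handles a special case I thought could be significant
--     for this particular problem domain. Since the most predominant language
--     on Stack Overflow is C#, and because the tokenizer will by default
--     split C# into two independent tokens, I felt it would be worthwhile
--     to join this particular token pair back into a single token. I also
--     did F# since it is another language found on there and was relatively
--     easy to add as well.
--     '''
--     words = []
--     n = len(ws)
--     i = 0
--     while i < n:
--         a = ws[i]
--         b = (i + 1) < n and ws[i + 1] or ''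
--         if b == '#' and a in special:
--             words.append('%s%s' % (a,b))
--             i += 2
--         else:
--             words.append(a)
--             i += 1
--     return words
-- ===== SOURCE B (Python) =====
-- special = set(['c', 'f'])
--
-- def rejoin_special(ws):
--     n = len(ws)
--     # pass 1: table of merge start points
--     starts = set(i for i in range(n - 1) if ws[i] in special and ws[i + 1] == '#')
--     # pass 2: rebuild, skipping the '#' consumed by its predecessor
--     out = []
--     for i in range(n):
--         if i in starts:
--             out.append(ws[i] + '#')
--         elif i - 1 in starts:
--             pass
--         else:
--             out.append(ws[i])
--     return out
-- ===== Notes on version B (the rewrite author's own statement) =====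
-- stated objective: alternative
-- what changed: Replaced A's index-advancing while-loop state machine (which skips ahead by 2 after a merge) with two independent passes: first a precomputed set of merge-start indices, then a uniform rebuild over all indices that emits the merged token at a start, drops an index whose predecessor is a start, and copies everything else.
import Mathlib
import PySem

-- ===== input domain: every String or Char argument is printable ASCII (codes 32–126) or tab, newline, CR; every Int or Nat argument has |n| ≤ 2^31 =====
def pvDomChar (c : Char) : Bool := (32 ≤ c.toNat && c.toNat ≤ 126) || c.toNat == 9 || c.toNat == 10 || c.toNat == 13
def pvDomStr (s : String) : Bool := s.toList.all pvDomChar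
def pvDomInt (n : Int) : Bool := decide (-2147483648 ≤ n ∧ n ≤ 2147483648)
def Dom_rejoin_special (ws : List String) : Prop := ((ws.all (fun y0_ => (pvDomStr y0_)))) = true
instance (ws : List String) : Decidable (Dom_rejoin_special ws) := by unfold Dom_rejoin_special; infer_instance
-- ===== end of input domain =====

-- B replaces A's index-advancing while-loop state machine by two passes (a precomputed set of
-- merge-start indices, then a rebuild that skips an index whose predecessor is a merge start);
-- objective: alternative decomposition, same cost.

-- ===== PORT A =====
-- special = set(['c', 'f'])
def pvSpecial : List String := ["c", "f"]

-- the while loop; i is always 0 ≤ i < n = len ws when ws[i] is read, so pyGetD's default is never used.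
-- Python's `b = (i+1) < n and ws[i+1] or ''`: when ws[i+1] is falsy it is '' itself, so taking
-- b = ws[i+1] whenever i+1 < n (else '') is exact.
def rejoin_loopA (ws : List String) (n : Int) (words : List String) (i : Int) : List String :=
  if h : i < n then
    let a := PySem.List.pyGetD ws i ""
    let b := if i + 1 < n then PySem.List.pyGetD ws (i + 1) "" else ""
    if b = "#" ∧ pvSpecial.contains a = true then
      rejoin_loopA ws n (words ++ [a ++ b]) (i + 2)
    else
      rejoin_loopA ws n (words ++ [a]) (i + 1)
  else words
termination_by (n - i).toNat
decreasing_by all_goals omega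

def rejoin_special (ws : List String) : List String :=
  rejoin_loopA ws (ws.length : Int) [] 0

-- ===== PORT B =====
-- pass 1: the set of indices where a merge starts
def rejoin_starts (ws : List String) : List Int :=
  (PySem.List.pyRange 0 ((ws.length : Int) - 1) 1).filter
    (fun i => pvSpecial.contains (PySem.List.pyGetD ws i "") &&
              PySem.List.pyGetD ws (i + 1) "" == "#")

-- pass 2: rebuild, skipping the '#' consumed by its predecessor
def rejoin_special_alt (ws : List String) : List String :=
  (PySem.List.pyRange 0 (ws.length : Int) 1).foldl
    (fun out i =>
      if (rejoin_starts ws).contains i then out ++ [PySem.List.pyGetD ws i "" ++ "#"]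
      else if (rejoin_starts ws).contains (i - 1) then out
      else out ++ [PySem.List.pyGetD ws i ""]) []

-- ===== PRECONDITION & SPEC =====
def Spec_rejoin_special (ws : List String) (out : List String) : Prop := out = rejoin_special_alt ws
instance (ws : List String) (out : List String) : Decidable (Spec_rejoin_special ws out) := by unfold Spec_rejoin_special; infer_instance

-- ===== CLAIM (what is proved, stated in full; the proofs are below) =====
def Claim_equal_rejoin_special : Prop := ∀ (ws : List String), Dom_rejoin_special ws → Spec_rejoin_special ws (rejoin_special ws)

-- ===== LEMMAS AND PROOFS =====

-- the piece pass 2 appends at index i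
def rejoin_piece (ws : List String) (i : Int) : List String :=
  if (rejoin_starts ws).contains i then [PySem.List.pyGetD ws i "" ++ "#"]
  else if (rejoin_starts ws).contains (i - 1) then []
  else [PySem.List.pyGetD ws i ""]

lemma mem_starts (ws : List String) (j : Int) :
    j ∈ rejoin_starts ws ↔
      0 ≤ j ∧ j < (ws.length : Int) - 1 ∧
      pvSpecial.contains (PySem.List.pyGetD ws j "") = true ∧
      PySem.List.pyGetD ws (j + 1) "" = "#" := by
  simp [rejoin_starts, List.mem_filter, PySem.List.mem_pyRange_one]
  tauto

lemma starts_not_adjacent (ws : List String) (j : Int)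
    (h : j ∈ rejoin_starts ws) : (j + 1) ∉ rejoin_starts ws := by
  rw [mem_starts] at h
  intro h1
  rw [mem_starts, h.2.2.2] at h1
  exact absurd h1.2.2.1 (by decide)

lemma piece_start (ws : List String) (i : Int) (h : i ∈ rejoin_starts ws) :
    rejoin_piece ws i = [PySem.List.pyGetD ws i "" ++ "#"] := by
  unfold rejoin_piece
  rw [if_pos (by simpa using h)]

lemma piece_skip (ws : List String) (i : Int) (h : (i - 1) ∈ rejoin_starts ws) :
    rejoin_piece ws i = [] := by
  unfold rejoin_piece
  rw [if_neg, if_pos (by simpa using h)]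
  have := starts_not_adjacent ws (i - 1) h
  simpa using this

lemma piece_plain (ws : List String) (i : Int) (h : i ∉ rejoin_starts ws)
    (h' : (i - 1) ∉ rejoin_starts ws) :
    rejoin_piece ws i = [PySem.List.pyGetD ws i ""] := by
  unfold rejoin_piece
  rw [if_neg (by simpa using h), if_neg (by simpa using h')]

lemma alt_eq_flatMap (ws : List String) :
    rejoin_special_alt ws =
      (PySem.List.pyRange 0 ((ws.length : Int)) 1).flatMap (rejoin_piece ws) := by
  unfold rejoin_special_alt
  have hstep : (fun (out : List String) (i : Int) =>
      if (rejoin_starts ws).contains i then out ++ [PySem.List.pyGetD ws i "" ++ "#"]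
      else if (rejoin_starts ws).contains (i - 1) then out
      else out ++ [PySem.List.pyGetD ws i ""]) =
      (fun out i => out ++ rejoin_piece ws i) := by
    funext out i
    unfold rejoin_piece
    split_ifs <;> simp
  rw [hstep, PySem.List.foldl_append_eq_flatMap]
  simp

-- the loop of A, from index i, produces exactly B's pieces for indices i..n-1,
-- provided i-1 is not a merge start (the invariant A's stepping maintains)
lemma loopA_eq_flatMap (ws : List String) :
    ∀ (k : Nat) (i : Int), ((ws.length : Int) - i).toNat ≤ k → 0 ≤ i →
      (i - 1) ∉ rejoin_starts ws →
      ∀ words, rejoin_loopA ws (ws.length : Int) words i =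
        words ++ (PySem.List.pyRange i ((ws.length : Int)) 1).flatMap (rejoin_piece ws) := by
  intro k
  induction k with
  | zero =>
    intro i hk hi hprev words
    have hn : (ws.length : Int) ≤ i := by omega
    rw [rejoin_loopA, PySem.List.pyRange_one_eq_nil hn]
    simp [not_lt.mpr hn]
  | succ k ih =>
    intro i hk hi hprev words
    by_cases h : i < (ws.length : Int)
    · rw [rejoin_loopA]
      simp only [h, dite_true]
      by_cases hc : (if i + 1 < (ws.length : Int) then PySem.List.pyGetD ws (i + 1) "" else "") = "#"
            ∧ pvSpecial.contains (PySem.List.pyGetD ws i "") = true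
      · -- merge branch: i is a merge start
        have h1 : i + 1 < (ws.length : Int) := by
          by_contra hno
          rw [if_neg hno] at hc
          exact absurd hc.1 (by decide)
        rw [if_pos h1] at hc
        have hmem : i ∈ rejoin_starts ws := by
          rw [mem_starts]; exact ⟨hi, by omega, hc.2, hc.1⟩
        have hnext : (i + 1) ∉ rejoin_starts ws := starts_not_adjacent ws i hmem
        rw [if_pos (by rw [if_pos h1]; exact ⟨hc.1, hc.2⟩)]
        have e2 : i + 2 = i + 1 + 1 := by ring
        rw [e2, ih (i + 1 + 1) (by omega) (by omega) (by simpa using hnext)]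
        rw [PySem.List.pyRange_one_cons h,
            PySem.List.pyRange_one_cons (by omega : i + 1 < (ws.length : Int))]
        simp [piece_start ws i hmem, piece_skip ws (i + 1) (by simpa using hmem),
              if_pos h1, hc.1]
      · -- normal branch: i is not a merge start
        have hmem : i ∉ rejoin_starts ws := by
          intro hcc
          rw [mem_starts] at hcc
          exact hc (by rw [if_pos (by omega)]; exact ⟨hcc.2.2.2, hcc.2.2.1⟩)
        rw [if_neg hc]
        rw [ih (i + 1) (by omega) (by omega) (by simpa using hmem)]
        rw [PySem.List.pyRange_one_cons h]
        simp [piece_plain ws i hmem hprev]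
    · rw [rejoin_loopA, PySem.List.pyRange_one_eq_nil (by omega)]
      simp [h]

lemma starts_neg_one (ws : List String) : (-1 : Int) ∉ rejoin_starts ws := by
  intro h
  rw [mem_starts] at h
  omega

-- ===== VERDICT (by name: the statement is the Claim_ definition above) =====
theorem rejoin_special_spec : Claim_equal_rejoin_special := by
  intro ws _
  unfold Spec_rejoin_special rejoin_special
  rw [alt_eq_flatMap]
  have := loopA_eq_flatMap ws ((ws.length : Int) - 0).toNat 0 (le_refl _) (by omega)
    (by simpa using starts_neg_one ws) []
  simpa using this
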